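-- pv_equiv track=rewrite | github.com/ciamara/Probabilistic-Methods | Lab2/generatory.py | shiftGen
-- ===== SOURCE A (Python) =====
-- def shiftGen(n, p, q, b, length):
--
--     bits = []
--     previous = b.copy()
--
--     for i in range(n * length):
--         new_bit = previous[-p] ^ previous[-q]
--         previous = previous[1:] + [new_bit]
--         bits.append(new_bit)
--
--     # bits to ints
--     results = []
--     for i in range(n):
--         chunk = bits[i * length:(i + 1) * length]
--         number = 0
--         for bit in chunk:
--             number = (number << 1) | bit
--         results.append(number)
--
--     return results
-- ===== SOURCE B (Python) =====
-- def shiftGen(n, p, q, b, length):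
--     # Fused single pass: shift each new LFSR bit straight into the accumulator,
--     # no intermediate bits list and no chunk slicing.
--     results = []
--     state = b.copy()
--     for _ in range(n):
--         number = 0
--         for _ in range(length):
--             new_bit = state[-p] ^ state[-q]
--             state = state[1:] + [new_bit]
--             number = (number << 1) | new_bit
--         results.append(number)
--     return results
-- ===== Notes on version B (the rewrite author's own statement) =====
-- stated objective: alternative
-- what changed: Fuses A's two phases (generate all n*length bits into a list, then slice it into chunks and pack each) into a single pass that shifts every new LFSR bit directly into the running accumulator of the current output number, eliminating the bits list and the chunk slicing.
import Mathlib
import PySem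

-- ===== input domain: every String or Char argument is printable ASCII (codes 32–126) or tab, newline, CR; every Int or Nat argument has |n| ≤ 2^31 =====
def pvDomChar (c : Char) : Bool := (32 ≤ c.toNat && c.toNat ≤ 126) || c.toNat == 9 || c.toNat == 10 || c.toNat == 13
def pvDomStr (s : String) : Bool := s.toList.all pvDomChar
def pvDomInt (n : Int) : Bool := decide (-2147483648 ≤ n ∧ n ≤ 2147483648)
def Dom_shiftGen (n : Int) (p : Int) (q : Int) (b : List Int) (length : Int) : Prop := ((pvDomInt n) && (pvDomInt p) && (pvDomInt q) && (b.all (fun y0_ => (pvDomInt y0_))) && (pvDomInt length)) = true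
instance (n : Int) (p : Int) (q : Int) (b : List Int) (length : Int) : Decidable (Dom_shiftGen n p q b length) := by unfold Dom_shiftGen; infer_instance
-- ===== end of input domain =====

-- B fuses A's generate-all-bits-then-chunk two-pass into one pass that shifts each
-- new LFSR bit directly into the current output accumulator (same cost, no bits list).


-- ===== PORT A =====
-- previous[-p] is PySem.List.pyGet? (getD 0 is reached only outside Pre_, where Python raises
-- IndexError); previous[1:] is List.drop 1 (exact); ^ is PySem.Int.bxor, << / | are <<< / PySem.Int.bor.
def shiftGen (n : Int) (p : Int) (q : Int) (b : List Int) (length : Int) : List Int :=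
  let gen := (PySem.List.pyRange 0 (n * length) 1).foldl
    (fun (s : List Int × List Int) _ =>
      let new_bit := PySem.Int.bxor ((PySem.List.pyGet? s.2 (-p)).getD 0)
                                    ((PySem.List.pyGet? s.2 (-q)).getD 0)
      (s.1 ++ [new_bit], s.2.drop 1 ++ [new_bit]))
    (([] : List Int), b)
  (PySem.List.pyRange 0 n 1).foldl
    (fun results i =>
      let chunk := PySem.List.slice gen.1 (some (i * length)) (some ((i + 1) * length))
      let number := chunk.foldl (fun number bit => PySem.Int.bor (number <<< (1 : Nat)) bit) 0
      results ++ [number]) []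

-- ===== PORT B =====
def shiftGen_alt (n : Int) (p : Int) (q : Int) (b : List Int) (length : Int) : List Int :=
  ((PySem.List.pyRange 0 n 1).foldl
    (fun (acc : List Int × List Int) _ =>
      let inner := (PySem.List.pyRange 0 length 1).foldl
        (fun (s : Int × List Int) _ =>
          let new_bit := PySem.Int.bxor ((PySem.List.pyGet? s.2 (-p)).getD 0)
                                        ((PySem.List.pyGet? s.2 (-q)).getD 0)
          (PySem.Int.bor (s.1 <<< (1 : Nat)) new_bit, s.2.drop 1 ++ [new_bit]))
        ((0 : Int), acc.2)
      (acc.1 ++ [inner.1], inner.2))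
    (([] : List Int), b)).1

-- ===== PRECONDITION & SPEC =====
-- Pre_ admits exactly the inputs on which the Python A returns: either no bit is generated
-- (n*length ≤ 0), or the negative indices -p and -q are valid for the register (its size stays
-- len b throughout); otherwise previous[-p] / previous[-q] raises IndexError.
def Pre_shiftGen (n : Int) (p : Int) (q : Int) (b : List Int) (length : Int) : Prop :=
  n * length ≤ 0 ∨
    (1 - (b.length : Int) ≤ p ∧ p ≤ (b.length : Int) ∧
     1 - (b.length : Int) ≤ q ∧ q ≤ (b.length : Int))
instance (n : Int) (p : Int) (q : Int) (b : List Int) (length : Int) : Decidable (Pre_shiftGen n p q b length) := by unfold Pre_shiftGen; infer_instance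

def pvWitness_shiftGen : Int × Int × Int × List Int × Int := (2, 1, 3, [1, 0, 1], 3)

def Spec_shiftGen (n : Int) (p : Int) (q : Int) (b : List Int) (length : Int) (out : List Int) : Prop := out = shiftGen_alt n p q b length
instance (n : Int) (p : Int) (q : Int) (b : List Int) (length : Int) (out : List Int) : Decidable (Spec_shiftGen n p q b length out) := by unfold Spec_shiftGen; infer_instance

-- ===== CLAIM (what is proved, stated in full; the proofs are below) =====
def Claim_equal_shiftGen : Prop := ∀ (n : Int) (p : Int) (q : Int) (b : List Int) (length : Int), Dom_shiftGen n p q b length → Pre_shiftGen n p q b length → Spec_shiftGen n p q b length (shiftGen n p q b length)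

-- ===== LEMMAS AND PROOFS =====

-- One LFSR step: the new bit and the shifted register.
def lfBit (p q : Int) (st : List Int) : Int :=
  PySem.Int.bxor ((PySem.List.pyGet? st (-p)).getD 0) ((PySem.List.pyGet? st (-q)).getD 0)

def lfNext (p q : Int) (st : List Int) : List Int :=
  st.drop 1 ++ [lfBit p q st]

-- The next k bits of the stream, and the register after k steps.
def bitsFrom (p q : Int) : Nat → List Int → List Int
  | 0, _ => []
  | k + 1, st => lfBit p q st :: bitsFrom p q k (lfNext p q st)

def stAfter (p q : Int) : Nat → List Int → List Int
  | 0, st => st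
  | k + 1, st => stAfter p q k (lfNext p q st)

-- MSB-first packing of a bit list into a number, starting from num.
def packFrom (num : Int) (bits : List Int) : Int :=
  bits.foldl (fun number bit => PySem.Int.bor (number <<< (1 : Nat)) bit) num

-- B's per-number chunks, done k times from register st with run length Lt.
def outB (p q : Int) (Lt : Nat) : Nat → List Int → List Int
  | 0, _ => []
  | k + 1, st => packFrom 0 (bitsFrom p q Lt st) :: outB p q Lt k (stAfter p q Lt st)

theorem bitsFrom_length (p q : Int) (k : Nat) (st : List Int) :
    (bitsFrom p q k st).length = k := by
  induction k generalizing st with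
  | zero => rfl
  | succ k ih => simp [bitsFrom, ih]

theorem stAfter_add (p q : Int) (a b : Nat) (st : List Int) :
    stAfter p q (a + b) st = stAfter p q b (stAfter p q a st) := by
  induction a generalizing st with
  | zero => rw [Nat.zero_add]; rfl
  | succ a ih => rw [Nat.succ_add]; simp [stAfter, ih]

theorem bitsFrom_add (p q : Int) (a b : Nat) (st : List Int) :
    bitsFrom p q (a + b) st = bitsFrom p q a st ++ bitsFrom p q b (stAfter p q a st) := by
  induction a generalizing st with
  | zero => rw [Nat.zero_add]; rfl
  | succ a ih => rw [Nat.succ_add]; simp [bitsFrom, stAfter, ih]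

-- A's generating loop: the accumulated bits are bitsFrom, the register is stAfter.
theorem foldA_gen (p q : Int) (f : List Int × List Int → Int → List Int × List Int)
    (hf : ∀ s x, f s x = (s.1 ++ [lfBit p q s.2], lfNext p q s.2)) (l : List Int) :
    ∀ (bits st : List Int),
      l.foldl f (bits, st) = (bits ++ bitsFrom p q l.length st, stAfter p q l.length st) := by
  induction l with
  | nil => intro bits st; simp [bitsFrom, stAfter]
  | cons x xs ih =>
    intro bits st
    rw [List.foldl_cons, hf, ih]
    simp [bitsFrom, stAfter]

-- B's inner loop: packFrom over the generated bits, register advanced.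
theorem foldBinner_gen (p q : Int) (f : Int × List Int → Int → Int × List Int)
    (hf : ∀ s x, f s x = (PySem.Int.bor (s.1 <<< (1 : Nat)) (lfBit p q s.2), lfNext p q s.2))
    (l : List Int) :
    ∀ (num : Int) (st : List Int),
      l.foldl f (num, st) = (packFrom num (bitsFrom p q l.length st), stAfter p q l.length st) := by
  induction l with
  | nil => intro num st; simp [bitsFrom, stAfter, packFrom]
  | cons x xs ih =>
    intro num st
    rw [List.foldl_cons, hf, ih]
    simp [bitsFrom, stAfter, packFrom]

-- B's outer loop.
theorem foldBouter_gen (p q : Int) (Lt : Nat) (f : List Int × List Int → Int → List Int × List Int)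
    (hf : ∀ a x, f a x = (a.1 ++ [packFrom 0 (bitsFrom p q Lt a.2)], stAfter p q Lt a.2))
    (l : List Int) :
    ∀ (acc st : List Int),
      l.foldl f (acc, st) = (acc ++ outB p q Lt l.length st, stAfter p q (l.length * Lt) st) := by
  induction l with
  | nil => intro acc st; simp [outB, stAfter]
  | cons x xs ih =>
    intro acc st
    rw [List.foldl_cons, hf, ih]
    refine Prod.ext ?_ ?_
    · simp [outB]
    · show stAfter p q (xs.length * Lt) (stAfter p q Lt st)
        = stAfter p q ((x :: xs).length * Lt) st
      rw [← stAfter_add]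
      congr 1
      simp [Nat.succ_mul]; ring
    

-- The same three loop lemmas, stated on the literal port lambdas.
theorem foldAC (p q : Int) (l : List Int) (bits st : List Int) :
    l.foldl
      (fun (s : List Int × List Int) _ =>
        let new_bit := PySem.Int.bxor ((PySem.List.pyGet? s.2 (-p)).getD 0)
                                      ((PySem.List.pyGet? s.2 (-q)).getD 0)
        (s.1 ++ [new_bit], s.2.drop 1 ++ [new_bit])) (bits, st)
    = (bits ++ bitsFrom p q l.length st, stAfter p q l.length st) :=
  foldA_gen p q _ (fun _ _ => rfl) l bits st

theorem foldBinnerC (p q : Int) (l : List Int) (num : Int) (st : List Int) :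
    l.foldl
      (fun (s : Int × List Int) _ =>
        let new_bit := PySem.Int.bxor ((PySem.List.pyGet? s.2 (-p)).getD 0)
                                      ((PySem.List.pyGet? s.2 (-q)).getD 0)
        (PySem.Int.bor (s.1 <<< (1 : Nat)) new_bit, s.2.drop 1 ++ [new_bit])) (num, st)
    = (packFrom num (bitsFrom p q l.length st), stAfter p q l.length st) :=
  foldBinner_gen p q _ (fun _ _ => rfl) l num st

theorem foldBouterC (p q len : Int) (l : List Int) (acc st : List Int) :
    l.foldl
      (fun (a : List Int × List Int) _ =>
        let inner := (PySem.List.pyRange 0 len 1).foldl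
          (fun (s : Int × List Int) _ =>
            let new_bit := PySem.Int.bxor ((PySem.List.pyGet? s.2 (-p)).getD 0)
                                          ((PySem.List.pyGet? s.2 (-q)).getD 0)
            (PySem.Int.bor (s.1 <<< (1 : Nat)) new_bit, s.2.drop 1 ++ [new_bit]))
          ((0 : Int), a.2)
        (a.1 ++ [inner.1], inner.2)) (acc, st)
    = (acc ++ outB p q len.toNat l.length st, stAfter p q (l.length * len.toNat) st) := by
  refine foldBouter_gen p q len.toNat _ ?_ l acc st
  intro a x
  have hl : (PySem.List.pyRange 0 len 1).length = len.toNat := by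
    simp [PySem.List.length_pyRange_one]
  have h := foldBinnerC p q (PySem.List.pyRange 0 len 1) 0 a.2
  rw [hl] at h
  simp only [h]

theorem toNat_mul_of_nonneg (a b : Int) (ha : 0 ≤ a) :
    (a * b).toNat = a.toNat * b.toNat := by
  rcases le_or_gt 0 b with hb | hb
  · rw [Int.toNat_mul ha hb]
  · have h1 : a * b ≤ 0 := mul_nonpos_of_nonneg_of_nonpos ha hb.le
    simp [Int.toNat_of_nonpos h1, Int.toNat_of_nonpos hb.le]

theorem slice_nil {α : Type} (a b : Option Int) :
    PySem.List.slice ([] : List α) a b = [] := by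
  cases a <;> cases b <;> simp [PySem.List.slice, PySem.List.clampIdx]

-- A's chunk j equals B's run of length.toNat bits from the register after j runs.
theorem chunk_eq (p q : Int) (b : List Int) (n len : Int) (hn : 0 < n)
    (j : Int) (hj : 0 ≤ j) (hjn : j < n) :
    PySem.List.slice (bitsFrom p q (n * len).toNat b)
        (some (j * len)) (some ((j + 1) * len))
      = bitsFrom p q len.toNat (stAfter p q (j.toNat * len.toNat) b) := by
  rcases le_or_gt len 0 with hL | hL
  · have h0 : (n * len).toNat = 0 := by
      have : n * len ≤ 0 := mul_nonpos_of_nonneg_of_nonpos hn.le hL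
      omega
    have hL0 : len.toNat = 0 := Int.toNat_of_nonpos hL
    rw [h0, hL0]
    simpa [bitsFrom] using slice_nil (α := Int) (some (j * len)) (some ((j + 1) * len))
  · have hj1 : 0 ≤ j * len := mul_nonneg hj hL.le
    have hj2 : 0 ≤ (j + 1) * len := mul_nonneg (by omega) hL.le
    rw [PySem.List.slice_toNat _ hj1 hj2]
    have e1 : (j * len).toNat = j.toNat * len.toNat := toNat_mul_of_nonneg _ _ hj
    have e2 : ((j + 1) * len).toNat = (j.toNat + 1) * len.toNat := by
      rw [toNat_mul_of_nonneg _ _ (by omega : (0:Int) ≤ j + 1)]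
      congr 1; omega
    have e3 : ((j + 1) * len).toNat - (j * len).toNat = len.toNat := by
      rw [e1, e2, Nat.succ_mul, Nat.add_sub_cancel_left]
    have en : (n * len).toNat = n.toNat * len.toNat := toNat_mul_of_nonneg _ _ hn.le
    have hjn' : j.toNat < n.toNat := by omega
    -- split the bit stream at j.toNat * len.toNat
    obtain ⟨m, hm⟩ : ∃ m, n.toNat - j.toNat = m + 1 := ⟨n.toNat - j.toNat - 1, by omega⟩
    have hsplit : n.toNat * len.toNat
        = j.toNat * len.toNat + (len.toNat + m * len.toNat) := by
      have : n.toNat = j.toNat + (m + 1) := by omega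
      rw [this]; ring
    rw [en, e3, e1, hsplit, bitsFrom_add]
    rw [List.drop_left' (by rw [bitsFrom_length])]
    rw [bitsFrom_add]
    rw [List.take_left' (by rw [bitsFrom_length])]

-- The chunked map over range(n) equals B's outB, generalized over the start index.
theorem chunks_eq (p q : Int) (b : List Int) (n len : Int) (hn : 0 < n)
    (N : Nat) : ∀ (j : Int), 0 ≤ j → j + (N : Int) = n →
    (PySem.List.pyRange j n 1).map
      (fun i => packFrom 0 (PySem.List.slice (bitsFrom p q (n * len).toNat b)
        (some (i * len)) (some ((i + 1) * len))))
    = outB p q len.toNat N (stAfter p q (j.toNat * len.toNat) b) := by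
  induction N with
  | zero =>
    intro j hj hjn
    have : (n - j).toNat = 0 := by omega
    simp [PySem.List.pyRange_one, this, outB]
  | succ N ih =>
    intro j hj hjn
    rw [PySem.List.pyRange_one_cons (by omega)]
    rw [List.map_cons, chunk_eq p q b n len hn j hj (by omega)]
    rw [ih (j + 1) (by omega) (by omega)]
    have e : (j + 1).toNat * len.toNat = j.toNat * len.toNat + len.toNat := by
      have : (j + 1).toNat = j.toNat + 1 := by omega
      rw [this, Nat.succ_mul]
    rw [e, stAfter_add]
    rfl

-- ===== VERDICT (by name: the statement is the Claim_ definition above) =====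
theorem shiftGen_spec : Claim_equal_shiftGen := by
  intro n p q b length _ _
  unfold Spec_shiftGen
  rcases le_or_gt n 0 with hn | hn
  · have h0 : (n - 0).toNat = 0 := by omega
    have hr : PySem.List.pyRange 0 n 1 = [] := by
      simp [PySem.List.pyRange_one]; omega
    simp [shiftGen, shiftGen_alt, hr]
  · have hlenN : (PySem.List.pyRange 0 n 1).length = n.toNat := by
      simp [PySem.List.length_pyRange_one]
    have hlenM : (PySem.List.pyRange 0 (n * length) 1).length = (n * length).toNat := by
      simp [PySem.List.length_pyRange_one]
    simp only [shiftGen, shiftGen_alt]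
    rw [foldAC, foldBouterC, hlenM, hlenN]
    simp only [List.nil_append]
    rw [PySem.List.foldl_append_singleton_eq_map]
    have h := chunks_eq p q b n length hn n.toNat 0 le_rfl (by omega)
    simp only [packFrom] at h
    simpa [stAfter] using h
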